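-- pv_equiv track=rewrite | github.com/will-snavely/adventofcode | aoc2018/day16.py | part2
-- ===== SOURCE A (Python) =====
-- def part2(candidates):
--     determined = set()
--     mapping = {}
--     done = False
--     while not done:
--         done = True
--         for op, cands in candidates.items():
--             diff = cands - determined
--             if len(diff) == 1:
--                 done = False
--                 singleton = list(diff)[0]
--                 determined.add(singleton)
--                 mapping[op] = singleton
--     return mapping
-- ===== SOURCE B (Python) =====
-- def part2(candidates):
--     # Set-free algorithm: each op keeps only a numeric (count, sum) sketch of its
--     # undetermined candidates, and a value->ops inverted index (built once) routes
--     # each newly determined value to exactly the ops whose candidate set contains it.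
--     cnt = {}
--     sm = {}
--     index = {}
--     for op, cands in candidates.items():
--         cnt[op] = len(cands)
--         sm[op] = sum(cands)
--         for v in cands:
--             index.setdefault(v, []).append(op)
--     mapping = {}
--     unresolved = list(candidates)
--     while True:
--         pending = []
--         for op in unresolved:
--             if cnt[op] == 1:
--                 v = sm[op]
--                 mapping[op] = v
--                 for o in index.get(v, ()):
--                     cnt[o] -= 1
--                     sm[o] -= v
--             else:
--                 pending.append(op)
--         if len(pending) == len(unresolved):
--             return mapping
--         unresolved = pending
-- ===== Notes on version B (the rewrite author's own statement) =====
-- stated objective: alternative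
-- what changed: B drops the set data structure entirely: instead of recomputing 'cands - determined' set differences each sweep, each op keeps a numeric (count, sum) sketch of its undetermined candidates, and a value->ops inverted index built once routes every newly determined value (recovered as the remaining sum when the count hits 1) to exactly the ops whose candidate set contains it; the sweep schedule itself is kept because A's result provably depends on it.
import Mathlib
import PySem

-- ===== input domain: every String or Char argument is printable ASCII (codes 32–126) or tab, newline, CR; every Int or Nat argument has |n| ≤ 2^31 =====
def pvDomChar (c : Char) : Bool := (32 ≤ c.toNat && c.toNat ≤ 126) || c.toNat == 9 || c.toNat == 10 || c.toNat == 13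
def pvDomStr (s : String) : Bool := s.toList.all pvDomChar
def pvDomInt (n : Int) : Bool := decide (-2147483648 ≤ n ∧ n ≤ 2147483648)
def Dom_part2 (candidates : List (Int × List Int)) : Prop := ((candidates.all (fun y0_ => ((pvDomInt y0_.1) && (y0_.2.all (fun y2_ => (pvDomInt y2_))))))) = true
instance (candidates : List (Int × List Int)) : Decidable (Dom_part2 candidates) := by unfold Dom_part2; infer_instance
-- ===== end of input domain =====

-- B eliminates the set data structure entirely: each op keeps only a numeric
-- (count, sum) sketch of its undetermined candidates, updated through a value→ops
-- inverted index built once (alternative algorithm; A's pass schedule itself is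
-- semantically forced, since the result depends on it).

-- ===== PORT A =====
-- The while-loop runs one more pass whenever a pass determined something; every such
-- pass adds a value (not seen before) to `determined`, all drawn from the candidate
-- sets, so the number of passes is bounded by part2Fuel below (proved in the lemmas:
-- the fuel is never exhausted).  The fuel is only a totality guard, not an algorithm change.
def part2Fuel (candidates : List (Int × List Int)) : Nat :=
  (candidates.flatMap (fun p => p.2)).dedup.length + 1

-- one pass of the `for op, cands in candidates.items()` loop; state = (done, determined, mapping)
def part2Pass : List (Int × List Int) → Bool × List Int × PySem.Dict Int Int →
    Bool × List Int × PySem.Dict Int Int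
  | [], st => st
  | p :: rest, st =>
      let diff := PySem.Set.diff p.2 st.2.1
      -- `list(diff)[0]` is read only when len(diff) == 1, so it is the unique element (headI)
      if PySem.Set.len diff = 1 then
        part2Pass rest (false, PySem.Set.add st.2.1 diff.headI, st.2.2.insert p.1 diff.headI)
      else part2Pass rest st

def part2Loop (items : List (Int × List Int)) : Nat → List Int → PySem.Dict Int Int → PySem.Dict Int Int
  | 0, _, mp => mp
  | fuel+1, det, mp =>
      let st := part2Pass items (true, det, mp)
      if st.1 then st.2.2 else part2Loop items fuel st.2.1 st.2.2

def part2 (candidates : List (Int × List Int)) : List (Int × Int) :=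
  (part2Loop candidates (part2Fuel candidates) PySem.Set.empty PySem.Dict.empty).items

-- ===== PORT B =====
-- transliteration of Source B: the single build loop fills cnt (len), sm (sum) and the
-- value→ops inverted index (setdefault(v, []).append(op) = modify v [] (· ++ [op])).
def bBuild (candidates : List (Int × List Int)) :
    PySem.Dict Int Int × PySem.Dict Int Int × PySem.Dict Int (List Int) :=
  candidates.foldl (fun acc p =>
      (acc.1.insert p.1 (p.2.length : Int),
       acc.2.1.insert p.1 p.2.sum,
       p.2.foldl (fun ix v => ix.modify v [] (fun l => l ++ [p.1])) acc.2.2))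
    (PySem.Dict.empty, PySem.Dict.empty, PySem.Dict.empty)

-- the inner `for op in unresolved:` loop; state = (pending, cnt, sm, mapping).
-- cnt[op]/sm[op] are read as getD _ 0: every op key is inserted by the build loop.
def bPassGo (index : PySem.Dict Int (List Int)) :
    List Int → List Int × PySem.Dict Int Int × PySem.Dict Int Int × PySem.Dict Int Int →
    List Int × PySem.Dict Int Int × PySem.Dict Int Int × PySem.Dict Int Int
  | [], st => st
  | op :: rest, st =>
      if st.2.1.getD op 0 = 1 then
        -- the single undetermined candidate is recovered as the remaining sum
        let v := st.2.2.1.getD op 0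
        let upd := (index.getD v []).foldl
          (fun cs o => (cs.1.modify o 0 (fun c => c - 1), cs.2.modify o 0 (fun s => s - v)))
          (st.2.1, st.2.2.1)
        bPassGo index rest (st.1, upd.1, upd.2, st.2.2.2.insert op v)
      else bPassGo index rest (st.1 ++ [op], st.2.1, st.2.2.1, st.2.2.2)

-- termination lemma for the outer `while True:` loop (cited in decreasing_by):
-- pending never gets longer than the scanned unresolved list.
lemma bPassGo_len_le (index : PySem.Dict Int (List Int)) :
    ∀ (l : List Int) st, ((bPassGo index l st).1).length ≤ st.1.length + l.length := by
  intro l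
  induction l with
  | nil => intro st; simp [bPassGo]
  | cons op rest ih =>
      intro st
      simp only [bPassGo]
      split
      · refine le_trans (ih _) ?_
        simp only [List.length_cons]
        omega
      · refine le_trans (ih _) ?_
        simp only [List.length_append, List.length_cons, List.length_nil]
        omega

def bLoop (index : PySem.Dict Int (List Int)) (cnt sm mp : PySem.Dict Int Int)
    (unresolved : List Int) : PySem.Dict Int Int :=
  let st := bPassGo index unresolved ([], cnt, sm, mp)
  if hlen : st.1.length = unresolved.length then st.2.2.2
  else bLoop index st.2.1 st.2.2.1 st.2.2.2 st.1
termination_by unresolved.length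
decreasing_by
  have h := bPassGo_len_le index unresolved ([], cnt, sm, mp)
  simp only [List.length_nil, Nat.zero_add] at h
  have e : st.1.length = (bPassGo index unresolved ([], cnt, sm, mp)).1.length := rfl
  omega

def part2_alt (candidates : List (Int × List Int)) : List (Int × Int) :=
  let b := bBuild candidates
  (bLoop b.2.2 b.1 b.2.1 PySem.Dict.empty (candidates.map Prod.fst)).items

-- ===== PRECONDITION & SPEC =====
-- Pre_ excludes lists with duplicate dict keys or duplicate set elements: they cannot
-- arise from A's dict[int, set[int]] argument, whose list/set encoding they make ambiguous.
def Pre_part2 (candidates : List (Int × List Int)) : Prop :=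
  (candidates.map Prod.fst).Nodup ∧ ∀ p ∈ candidates, p.2.Nodup
instance (candidates : List (Int × List Int)) : Decidable (Pre_part2 candidates) := by
  unfold Pre_part2; infer_instance

def pvWitness_part2 : (List (Int × List Int)) := [(0, [1]), (1, [1, 2])]

def Spec_part2 (candidates : List (Int × List Int)) (out : List (Int × Int)) : Prop :=
  out = part2_alt candidates
instance (candidates : List (Int × List Int)) (out : List (Int × Int)) :
    Decidable (Spec_part2 candidates out) := by unfold Spec_part2; infer_instance

-- ===== CLAIM (what is proved, stated in full; the proofs are below) =====
def Claim_equal_part2 : Prop := ∀ (candidates : List (Int × List Int)),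
  Dom_part2 candidates → Pre_part2 candidates → Spec_part2 candidates (part2 candidates)

-- ===== LEMMAS AND PROOFS =====

lemma diff_nil_right (s : List Int) : PySem.Set.diff s [] = s := by
  simp [PySem.Set.diff]

lemma diff_append (s t u : List Int) :
    PySem.Set.diff s (t ++ u) = PySem.Set.diff (PySem.Set.diff s t) u := by
  simp only [PySem.Set.diff, List.filter_filter]
  refine List.filter_congr ?_
  intro a _
  by_cases h1 : a ∈ t <;> by_cases h2 : a ∈ u <;> simp [PySem.Set.contains, h1, h2]

lemma discard_diff (s t : List Int) (v : Int) :
    PySem.Set.discard (PySem.Set.diff s t) v = PySem.Set.diff s (t ++ [v]) := by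
  simp only [PySem.Set.diff, PySem.Set.discard, List.filter_filter]
  refine List.filter_congr ?_
  intro a _
  by_cases h1 : a ∈ t <;> by_cases h2 : a = v <;> simp [PySem.Set.contains, h1, h2]

-- length / sum of a discard on a duplicate-free list
lemma discard_not_mem (s : List Int) (v : Int) (h : v ∉ s) :
    PySem.Set.discard s v = s := by
  simp only [PySem.Set.discard]
  refine List.filter_eq_self.2 ?_
  intro y hy
  have hyv : y ≠ v := fun e => h (e ▸ hy)
  simp [hyv]

lemma discard_cons_self (a : Int) (t : List Int) (v : Int) (h : a = v) :
    PySem.Set.discard (a :: t) v = PySem.Set.discard t v := by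
  simp [PySem.Set.discard, List.filter_cons, h]

lemma discard_cons_ne (a : Int) (t : List Int) (v : Int) (h : ¬ a = v) :
    PySem.Set.discard (a :: t) v = a :: PySem.Set.discard t v := by
  simp [PySem.Set.discard, List.filter_cons, h]

lemma discard_length (v : Int) :
    ∀ (s : List Int), s.Nodup →
      ((PySem.Set.discard s v).length : Int)
        = (s.length : Int) - (if v ∈ s then 1 else 0) := by
  intro s
  induction s with
  | nil => intro _; simp [PySem.Set.discard]
  | cons a t ih =>
      intro hnd
      rw [List.nodup_cons] at hnd
      by_cases hav : a = v
      · have hvt : v ∉ t := by rw [← hav]; exact hnd.1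
        rw [discard_cons_self a t v hav, discard_not_mem t v hvt]
        have hmem : v ∈ a :: t := by rw [← hav]; exact List.mem_cons_self
        rw [if_pos hmem]
        simp only [List.length_cons]
        push_cast
        ring
      · rw [discard_cons_ne a t v hav]
        have ht := ih hnd.2
        have hmem : (v ∈ a :: t) ↔ (v ∈ t) := by
          simp only [List.mem_cons, or_iff_right_iff_imp]
          intro hva
          exact absurd hva.symm hav
        simp only [List.length_cons]
        by_cases hvt : v ∈ t
        · rw [if_pos (hmem.2 hvt)]
          rw [if_pos hvt] at ht
          push_cast at ht ⊢
          omega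
        · rw [if_neg (fun h => hvt (hmem.1 h))]
          rw [if_neg hvt] at ht
          push_cast at ht ⊢
          omega

lemma discard_sum (v : Int) :
    ∀ (s : List Int), s.Nodup →
      (PySem.Set.discard s v).sum = s.sum - (if v ∈ s then v else 0) := by
  intro s
  induction s with
  | nil => intro _; simp [PySem.Set.discard]
  | cons a t ih =>
      intro hnd
      rw [List.nodup_cons] at hnd
      by_cases hav : a = v
      · have hvt : v ∉ t := by rw [← hav]; exact hnd.1
        rw [discard_cons_self a t v hav, discard_not_mem t v hvt]
        have hmem : v ∈ a :: t := by rw [← hav]; exact List.mem_cons_self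
        rw [if_pos hmem, List.sum_cons, hav]
        ring
      · rw [discard_cons_ne a t v hav]
        have ht := ih hnd.2
        have hmem : (v ∈ a :: t) ↔ (v ∈ t) := by
          simp only [List.mem_cons, or_iff_right_iff_imp]
          intro hva
          exact absurd hva.symm hav
        simp only [List.sum_cons]
        rw [ht]
        by_cases hvt : v ∈ t
        · rw [if_pos (hmem.2 hvt), if_pos hvt]
          ring
        · rw [if_neg (fun h => hvt (hmem.1 h)), if_neg hvt]
          ring

lemma aPass_contains_stable :
    ∀ (its : List (Int × List Int)) st (k : Int), k ∉ its.map Prod.fst →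
      ((part2Pass its st).2.2).contains k = st.2.2.contains k := by
  intro its
  induction its with
  | nil => intro st k _; rfl
  | cons p rest ih =>
      intro st k hk
      simp only [List.map_cons, List.mem_cons, not_or] at hk
      simp only [part2Pass]
      split
      · rw [ih _ k hk.2]
        simp [PySem.Dict.contains_insert, hk.1]
      · exact ih _ k hk.2

lemma aPass_contains_mono :
    ∀ (its : List (Int × List Int)) st (k : Int), st.2.2.contains k = true →
      ((part2Pass its st).2.2).contains k = true := by
  intro its
  induction its with
  | nil => intro st k h; exact h
  | cons p rest ih =>
      intro st k h
      simp only [part2Pass]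
      split
      · exact ih _ k (by simp [PySem.Dict.contains_insert, h])
      · exact ih _ k h

-- a pass whose `done` flag survives changed nothing at all
lemma aPass_flag_mono :
    ∀ (its : List (Int × List Int)) st, (part2Pass its st).1 = true → st.1 = true := by
  intro its
  induction its with
  | nil => intro st h; exact h
  | cons p rest ih =>
      intro st h
      simp only [part2Pass] at h
      split at h
      · exact absurd (ih _ h) (by simp)
      · exact ih _ h

lemma aPass_id :
    ∀ (its : List (Int × List Int)) st, (part2Pass its st).1 = true →
      part2Pass its st = st := by
  intro its
  induction its with
  | nil => intro st _; rfl
  | cons p rest ih =>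
      intro st h
      simp only [part2Pass] at h ⊢
      by_cases hc : PySem.Set.len (PySem.Set.diff p.2 st.2.1) = 1
      · rw [if_pos hc] at h
        exact absurd (aPass_flag_mono _ _ h) (by simp)
      · rw [if_neg hc] at h ⊢
        exact ih _ h

lemma nodup_length_le_dedup (det flat : List Int) (hn : det.Nodup)
    (hsub : ∀ v ∈ det, v ∈ flat) : det.length ≤ flat.dedup.length := by
  have h1 : det.toFinset.card = det.length := List.toFinset_card_of_nodup hn
  have h2 : det.toFinset ⊆ flat.toFinset := by
    intro v hv
    exact List.mem_toFinset.2 (hsub v (List.mem_toFinset.1 hv))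
  have h3 := Finset.card_le_card h2
  have h4 : flat.toFinset.card = flat.dedup.length := List.card_toFinset flat
  omega

lemma key_eq_of_nodup {scope : List (Int × List Int)} (h : (scope.map Prod.fst).Nodup)
    {p q : Int × List Int} (hp : p ∈ scope) (hq : q ∈ scope) (hpq : p.1 = q.1) : p = q := by
  have := List.inj_on_of_nodup_map h
  exact this hp hq hpq

-- a filter keeps strictly fewer elements once one kept element is dropped
lemma filter_length_le {α : Type} (p q : α → Bool) :
    ∀ (l : List α), (∀ a ∈ l, q a = true → p a = true) →
      (l.filter q).length ≤ (l.filter p).length := by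
  intro l
  induction l with
  | nil => intro _; simp
  | cons a t ih =>
      intro hmono
      have hle := ih (fun b hb => hmono b (List.mem_cons_of_mem _ hb))
      simp only [List.filter_cons]
      by_cases hqa : q a = true
      · rw [if_pos hqa, if_pos (hmono a List.mem_cons_self hqa)]
        simp only [List.length_cons]
        omega
      · rw [if_neg hqa]
        split <;> (try simp only [List.length_cons]) <;> omega

lemma filter_length_lt {α : Type} (p q : α → Bool) :
    ∀ (l : List α), (∀ a ∈ l, q a = true → p a = true) →
      ∀ x ∈ l, p x = true → q x = false →
      (l.filter q).length < (l.filter p).length := by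
  intro l
  induction l with
  | nil => intro _ x hx; exact absurd hx (by simp)
  | cons a t ih =>
      intro hmono x hx hpx hqx
      have hmt : ∀ b ∈ t, q b = true → p b = true :=
        fun b hb => hmono b (List.mem_cons_of_mem _ hb)
      have hle := filter_length_le p q t hmt
      simp only [List.filter_cons]
      rcases List.mem_cons.1 hx with rfl | hxt
      · rw [if_pos hpx, if_neg (by simp [hqx])]
        simp only [List.length_cons]
        omega
      · have hlt := ih hmt x hxt hpx hqx
        by_cases hqa : q a = true
        · rw [if_pos hqa, if_pos (hmono a List.mem_cons_self hqa)]
          simp only [List.length_cons]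
          omega
        · rw [if_neg hqa]
          split <;> (try simp only [List.length_cons]) <;> omega

-- projection of the paired (cnt, sm) decrement fold
lemma foldl_pair_proj {α β γ : Type} (f : β → α → β) (g : γ → α → γ) :
    ∀ (l : List α) (b : β) (c : γ),
      l.foldl (fun cs o => (f cs.1 o, g cs.2 o)) (b, c) = (l.foldl f b, l.foldl g c) := by
  intro l
  induction l with
  | nil => intro b c; rfl
  | cons a t ih => intro b c; simp only [List.foldl_cons]; exact ih _ _

-- a modify-fold over duplicate-free keys touches each entry at most once
lemma foldl_modify_getD_nodup {ν : Type} (z : ν) (f : ν → ν) :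
    ∀ (l : List Int), l.Nodup → ∀ (d : PySem.Dict Int ν) (k : Int),
      (l.foldl (fun d o => d.modify o z f) d).getD k z
        = if k ∈ l then f (d.getD k z) else d.getD k z := by
  intro l
  induction l with
  | nil => intro _ d k; simp
  | cons o rest ih =>
      intro hnd d k
      rw [List.nodup_cons] at hnd
      simp only [List.foldl_cons]
      rw [ih hnd.2, PySem.Dict.getD_modify]
      by_cases hk : k = o
      · subst hk
        simp [hnd.1]
      · simp [hk, List.mem_cons]

-- the inverted index: fold over one candidate set
lemma innerIdx_getD_notmem (k : Int) (v : Int) :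
    ∀ (l : List Int) (ix : PySem.Dict Int (List Int)), v ∉ l →
      (l.foldl (fun ix w => ix.modify w [] (fun t => t ++ [k])) ix).getD v []
        = ix.getD v [] := by
  intro l
  induction l with
  | nil => intro ix _; rfl
  | cons w rest ih =>
      intro ix hv
      simp only [List.mem_cons, not_or] at hv
      simp only [List.foldl_cons]
      rw [ih _ hv.2, PySem.Dict.getD_modify, if_neg hv.1]

lemma innerIdx_getD (k : Int) (v : Int) :
    ∀ (l : List Int), l.Nodup → ∀ (ix : PySem.Dict Int (List Int)),
      (l.foldl (fun ix w => ix.modify w [] (fun t => t ++ [k])) ix).getD v []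
        = ix.getD v [] ++ (if v ∈ l then [k] else []) := by
  intro l
  induction l with
  | nil => intro _ ix; simp
  | cons w rest ih =>
      intro hnd ix
      rw [List.nodup_cons] at hnd
      simp only [List.foldl_cons]
      by_cases hvw : v = w
      · subst hvw
        rw [innerIdx_getD_notmem _ _ _ _ hnd.1, PySem.Dict.getD_modify, if_pos rfl]
        simp
      · rw [ih hnd.2]
        rw [PySem.Dict.getD_modify, if_neg hvw]
        simp [List.mem_cons, hvw]

lemma bIndex_getD (v : Int) :
    ∀ (l : List (Int × List Int)), (∀ p ∈ l, p.2.Nodup) →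
      ∀ (ix : PySem.Dict Int (List Int)),
      (l.foldl (fun ix p => p.2.foldl (fun ix w => ix.modify w [] (fun t => t ++ [p.1])) ix) ix).getD v []
        = ix.getD v [] ++ (l.filter (fun p => decide (v ∈ p.2))).map Prod.fst := by
  intro l
  induction l with
  | nil => intro _ ix; simp
  | cons p rest ih =>
      intro hnd ix
      simp only [List.foldl_cons]
      rw [ih (fun q hq => hnd q (List.mem_cons_of_mem _ hq))]
      rw [innerIdx_getD p.1 v p.2 (hnd p List.mem_cons_self)]
      rw [List.filter_cons]
      by_cases hv : v ∈ p.2 <;> simp [hv]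

-- projections of the build loop
lemma bBuild_proj :
    ∀ (l : List (Int × List Int)) (c s : PySem.Dict Int Int) (i : PySem.Dict Int (List Int)),
      l.foldl (fun acc p =>
          (acc.1.insert p.1 (p.2.length : Int),
           acc.2.1.insert p.1 p.2.sum,
           p.2.foldl (fun ix v => ix.modify v [] (fun t => t ++ [p.1])) acc.2.2)) (c, s, i)
        = (l.foldl (fun d p => d.insert p.1 (p.2.length : Int)) c,
           l.foldl (fun d p => d.insert p.1 p.2.sum) s,
           l.foldl (fun ix p => p.2.foldl (fun ix w => ix.modify w [] (fun t => t ++ [p.1])) ix) i) := by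
  intro l
  induction l with
  | nil => intro c s i; rfl
  | cons p rest ih => intro c s i; simp only [List.foldl_cons]; exact ih _ _ _

-- initial getD of an insert-fold over the (duplicate-free) keys
lemma init_insert_getD {ν : Type} (f : Int × List Int → ν) (z : ν)
    (candidates : List (Int × List Int))
    (hk : (candidates.map Prod.fst).Nodup) (p : Int × List Int) (hp : p ∈ candidates) :
    (candidates.foldl (fun d q => d.insert q.1 (f q)) PySem.Dict.empty).getD p.1 z = f p := by
  have hitems : (candidates.foldl (fun d q => d.insert q.1 (f q))
      PySem.Dict.empty).items = candidates.map (fun q => (q.1, f q)) := by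
    have := PySem.Dict.items_foldl_insert_fresh (l := candidates) (k := Prod.fst)
      (v := f) (d := PySem.Dict.empty)
      (by intro a _; simp) (by simpa using hk)
    simpa using this
  have hkeys : (candidates.foldl (fun d q => d.insert q.1 (f q))
      PySem.Dict.empty).keys.Nodup := by
    simp only [PySem.Dict.keys, hitems, List.map_map]
    simpa [Function.comp] using hk
  exact PySem.Dict.getD_of_mem_items _
    (by rw [hitems]; exact List.mem_map_of_mem hp) hkeys z

-- the central pass simulation: A's pass over `its` (a sub-list of scope, with the
-- `done` flag b) against B's pass over the corresponding unresolved keys.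
lemma pass_sim (scope : List (Int × List Int)) (mp₀ : PySem.Dict Int Int)
    (index : PySem.Dict Int (List Int))
    (hscope : (scope.map Prod.fst).Nodup)
    (hnod2 : ∀ p ∈ scope, p.2.Nodup)
    (hidx : ∀ v, index.getD v [] = (scope.filter (fun p => decide (v ∈ p.2))).map Prod.fst) :
    ∀ (its : List (Int × List Int)) (det : List Int) (mp : PySem.Dict Int Int)
      (cnt sm : PySem.Dict Int Int) (pend : List Int) (b : Bool),
    (∀ p ∈ its, p ∈ scope) →
    ((its.map Prod.fst).Nodup) →
    (∀ p ∈ its, mp.contains p.1 = mp₀.contains p.1) →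
    (∀ p ∈ scope, mp.contains p.1 = true → PySem.Set.diff p.2 det = []) →
    (∀ p ∈ scope, mp.contains p.1 = false →
        cnt.getD p.1 0 = ((PySem.Set.diff p.2 det).length : Int) ∧
        sm.getD p.1 0 = (PySem.Set.diff p.2 det).sum) →
    det.Nodup →
    ((bPassGo index ((its.filter (fun p => !(mp₀.contains p.1))).map Prod.fst)
        (pend, cnt, sm, mp)).1
      = pend ++ (its.filter
          (fun p => !((part2Pass its (b, det, mp)).2.2.contains p.1))).map Prod.fst ∧
     (bPassGo index ((its.filter (fun p => !(mp₀.contains p.1))).map Prod.fst)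
        (pend, cnt, sm, mp)).2.2.2 = (part2Pass its (b, det, mp)).2.2 ∧
     (∃ δ, (part2Pass its (b, det, mp)).2.1 = det ++ δ ∧ ∀ v ∈ δ, ∃ p ∈ its, v ∈ p.2) ∧
     (part2Pass its (b, det, mp)).2.1.Nodup ∧
     ((part2Pass its (b, det, mp)).1 = false →
        b = false ∨ det.length < (part2Pass its (b, det, mp)).2.1.length) ∧
     ((part2Pass its (b, det, mp)).1 = false → b = false ∨
        ∃ p ∈ scope, mp₀.contains p.1 = false ∧
          (part2Pass its (b, det, mp)).2.2.contains p.1 = true) ∧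
     (∀ p ∈ scope, (part2Pass its (b, det, mp)).2.2.contains p.1 = true →
        PySem.Set.diff p.2 (part2Pass its (b, det, mp)).2.1 = []) ∧
     (∀ p ∈ scope, (part2Pass its (b, det, mp)).2.2.contains p.1 = false →
        (bPassGo index ((its.filter (fun p => !(mp₀.contains p.1))).map Prod.fst)
            (pend, cnt, sm, mp)).2.1.getD p.1 0
          = ((PySem.Set.diff p.2 (part2Pass its (b, det, mp)).2.1).length : Int) ∧
        (bPassGo index ((its.filter (fun p => !(mp₀.contains p.1))).map Prod.fst)
            (pend, cnt, sm, mp)).2.2.1.getD p.1 0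
          = (PySem.Set.diff p.2 (part2Pass its (b, det, mp)).2.1).sum)) := by
  intro its
  induction its with
  | nil =>
      intro det mp cnt sm pend b _ _ _ hres hcnt hdet
      refine ⟨by simp [part2Pass, bPassGo], by simp [part2Pass, bPassGo],
        ⟨[], by simp [part2Pass], by simp⟩, by simpa [part2Pass] using hdet,
        ?_, ?_, by simpa [part2Pass] using hres, ?_⟩
      · intro h
        exact Or.inl (by simpa [part2Pass] using h)
      · intro h
        exact Or.inl (by simpa [part2Pass] using h)
      · intro p hp hcf
        simp only [part2Pass] at hcf ⊢
        simp only [List.filter_nil, List.map_nil, bPassGo]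
        exact hcnt p hp hcf
  | cons hd rest ih =>
      obtain ⟨op, c⟩ := hd
      intro det mp cnt sm pend b hsub hnd hmp0 hres hcnt hdet
      have hopscope : ((op, c) : Int × List Int) ∈ scope := hsub _ (List.mem_cons_self)
      have hsubrest : ∀ p ∈ rest, p ∈ scope := fun p hp => hsub p (List.mem_cons_of_mem _ hp)
      have hopnotin : op ∉ rest.map Prod.fst := by
        have := hnd
        simp only [List.map_cons, List.nodup_cons] at this
        exact this.1
      have hndrest : (rest.map Prod.fst).Nodup := by
        have := hnd
        simp only [List.map_cons, List.nodup_cons] at this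
        exact this.2
      by_cases h0 : mp₀.contains op = true
      · -- op already resolved before this pass: A's diff is empty, B's list skips it
        have hmpop : mp.contains op = true := by rw [hmp0 _ (List.mem_cons_self)]; exact h0
        have hdiff : PySem.Set.diff c det = [] := hres _ hopscope hmpop
        have ha : part2Pass ((op, c) :: rest) (b, det, mp) = part2Pass rest (b, det, mp) := by
          simp only [part2Pass]
          rw [if_neg]
          rw [hdiff]
          simp [PySem.Set.len]
        have hfl : (((op, c) :: rest).filter (fun p => !(mp₀.contains p.1))).map Prod.fst
            = (rest.filter (fun p => !(mp₀.contains p.1))).map Prod.fst := by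
          simp [h0]
        rw [ha, hfl]
        have hmp0rest : ∀ p ∈ rest, mp.contains p.1 = mp₀.contains p.1 :=
          fun p hp => hmp0 p (List.mem_cons_of_mem _ hp)
        obtain ⟨i2, i3, ⟨δ, hδ, hδm⟩, i5, i6a, i6b, i7, i8⟩ :=
          ih det mp cnt sm pend b hsubrest hndrest hmp0rest hres hcnt hdet
        have hcontop : ((part2Pass rest (b, det, mp)).2.2).contains op = true :=
          aPass_contains_mono rest _ op hmpop
        refine ⟨?_, i3, ⟨δ, hδ, fun v hv => ?_⟩, i5, i6a, i6b, i7, i8⟩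
        · rw [i2]
          simp [hcontop]
        · obtain ⟨p, hp, hvp⟩ := hδm v hv
          exact ⟨p, List.mem_cons_of_mem _ hp, hvp⟩
      · -- op unresolved at pass start
        have hmpop : mp.contains op = false := by
          rw [hmp0 _ (List.mem_cons_self)]
          simpa using h0
        obtain ⟨hcntop, hsmop⟩ := hcnt _ hopscope hmpop
        have hfl : (((op, c) :: rest).filter (fun p => !(mp₀.contains p.1))).map Prod.fst
            = op :: (rest.filter (fun p => !(mp₀.contains p.1))).map Prod.fst := by
          simp [h0]
        by_cases hlen : PySem.Set.len (PySem.Set.diff c det) = 1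
        · -- resolution: A determines v and maps op; B recovers v as the remaining sum
          -- and routes the update through the inverted index
          obtain ⟨v, hv⟩ : ∃ v, PySem.Set.diff c det = [v] := by
            have : (PySem.Set.diff c det).length = 1 := by
              simpa [PySem.Set.len] using hlen
            exact List.length_eq_one_iff.1 this
          have hvmem : v ∈ PySem.Set.diff c det := by rw [hv]; exact List.mem_cons_self
          have hvc : v ∈ c := ((PySem.Set.mem_diff _ _ _).1 hvmem).1
          have hvdet : v ∉ det := ((PySem.Set.mem_diff _ _ _).1 hvmem).2
          have ha : part2Pass ((op, c) :: rest) (b, det, mp)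
              = part2Pass rest (false, det ++ [v], mp.insert op v) := by
            simp only [part2Pass]
            rw [hv]
            rw [if_pos (by simp [PySem.Set.len])]
            simp only [List.headI]
            rw [PySem.Set.add_of_not_mem hvdet]
          -- B's branch condition and resolved value
          have hbc : cnt.getD op 0 = 1 := by rw [hcntop, hv]; rfl
          have hbv : sm.getD op 0 = v := by rw [hsmop, hv]; simp
          -- the inverted-index entry for v and the two decrement folds
          have haff : index.getD v [] = (scope.filter (fun p => decide (v ∈ p.2))).map Prod.fst :=
            hidx v
          have haffnd : (index.getD v []).Nodup := by
            rw [haff]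
            exact hscope.sublist (List.Sublist.map _ List.filter_sublist)
          have haffmem : ∀ p ∈ scope, (p.1 ∈ index.getD v [] ↔ v ∈ p.2) := by
            intro p hp
            rw [haff]
            constructor
            · intro hmem
              obtain ⟨q, hq, hq1⟩ := List.mem_map.1 hmem
              have hqs := List.mem_filter.1 hq
              have : q = p := key_eq_of_nodup hscope hqs.1 hp hq1
              rw [← this]
              exact of_decide_eq_true hqs.2
            · intro hvp
              exact List.mem_map_of_mem (List.mem_filter.2 ⟨hp, decide_eq_true hvp⟩)
          have hb : bPassGo index
                (op :: (rest.filter (fun p => !(mp₀.contains p.1))).map Prod.fst)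
                (pend, cnt, sm, mp)
              = bPassGo index ((rest.filter (fun p => !(mp₀.contains p.1))).map Prod.fst)
                (pend,
                 (index.getD v []).foldl (fun d o => d.modify o 0 (fun x => x - 1)) cnt,
                 (index.getD v []).foldl (fun d o => d.modify o 0 (fun x => x - v)) sm,
                 mp.insert op v) := by
            simp only [bPassGo]
            rw [if_pos hbc, hbv]
            rw [foldl_pair_proj (fun (d : PySem.Dict Int Int) (o : Int) => d.modify o 0 (fun x => x - 1))
                (fun (d : PySem.Dict Int Int) (o : Int) => d.modify o 0 (fun x => x - v))]
          rw [ha, hfl, hb]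
          -- establish the invariants for the recursive call
          have hmp0rest : ∀ p ∈ rest, (mp.insert op v).contains p.1 = mp₀.contains p.1 := by
            intro p hp
            rw [PySem.Dict.contains_insert]
            have hne : p.1 ≠ op := by
              intro hEq
              exact hopnotin (hEq ▸ List.mem_map_of_mem hp)
            rw [beq_eq_false_iff_ne.mpr hne, Bool.false_or]
            exact hmp0 p (List.mem_cons_of_mem _ hp)
          have hres' : ∀ p ∈ scope, (mp.insert op v).contains p.1 = true →
              PySem.Set.diff p.2 (det ++ [v]) = [] := by
            intro p hp hcont
            rw [PySem.Dict.contains_insert] at hcont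
            rcases Bool.or_eq_true_iff.1 hcont with heq | hcont'
            · have hpeq : p = (op, c) := key_eq_of_nodup hscope hp hopscope (by simpa using heq)
              rw [hpeq]
              rw [diff_append, hv]
              simp [PySem.Set.diff]
            · rw [diff_append, hres p hp hcont']
              rfl
          have hcnt' : ∀ p ∈ scope, (mp.insert op v).contains p.1 = false →
              ((index.getD v []).foldl (fun d o => d.modify o 0 (fun x => x - 1)) cnt).getD p.1 0
                = ((PySem.Set.diff p.2 (det ++ [v])).length : Int) ∧
              ((index.getD v []).foldl (fun d o => d.modify o 0 (fun x => x - v)) sm).getD p.1 0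
                = (PySem.Set.diff p.2 (det ++ [v])).sum := by
            intro p hp hcont
            rw [PySem.Dict.contains_insert] at hcont
            have hcont' : mp.contains p.1 = false := (Bool.or_eq_false_iff.1 hcont).2
            obtain ⟨hc1, hc2⟩ := hcnt p hp hcont'
            have hdnd : (PySem.Set.diff p.2 det).Nodup :=
              PySem.Set.nodup_diff _ det (hnod2 p hp)
            have hvdiff : (v ∈ PySem.Set.diff p.2 det) ↔ (v ∈ p.2) := by
              rw [PySem.Set.mem_diff]
              exact ⟨fun h => h.1, fun h => ⟨h, hvdet⟩⟩
            have hdd : PySem.Set.diff p.2 (det ++ [v])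
                = PySem.Set.discard (PySem.Set.diff p.2 det) v := (discard_diff _ _ _).symm
            rw [foldl_modify_getD_nodup 0 (fun x => x - 1) _ haffnd,
                foldl_modify_getD_nodup 0 (fun x => x - v) _ haffnd, hc1, hc2, hdd]
            rw [discard_length v _ hdnd, discard_sum v _ hdnd]
            by_cases hvp : v ∈ p.2
            · rw [if_pos ((haffmem p hp).2 hvp), if_pos ((haffmem p hp).2 hvp),
                  if_pos (hvdiff.2 hvp), if_pos (hvdiff.2 hvp)]
              constructor <;> ring
            · rw [if_neg (fun h => hvp ((haffmem p hp).1 h)),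
                  if_neg (fun h => hvp ((haffmem p hp).1 h)),
                  if_neg (fun h => hvp (hvdiff.1 h)), if_neg (fun h => hvp (hvdiff.1 h))]
              constructor <;> ring
          have hdet' : (det ++ [v]).Nodup := by
            simp [List.nodup_append, hdet]
            intro a ha hav
            exact hvdet (hav ▸ ha)
          obtain ⟨i2, i3, ⟨δ, hδ, hδm⟩, i5, i6a, i6b, i7, i8⟩ :=
            ih (det ++ [v]) (mp.insert op v)
              ((index.getD v []).foldl (fun d o => d.modify o 0 (fun x => x - 1)) cnt)
              ((index.getD v []).foldl (fun d o => d.modify o 0 (fun x => x - v)) sm)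
              pend false hsubrest hndrest hmp0rest hres' hcnt' hdet'
          have hcontop : ((part2Pass rest (false, det ++ [v], mp.insert op v)).2.2).contains op
              = true := by
            refine aPass_contains_mono rest _ op ?_
            simp
          refine ⟨?_, i3, ⟨[v] ++ δ, by rw [hδ, List.append_assoc], ?_⟩, i5, ?_, ?_, i7, i8⟩
          · rw [i2]
            simp [hcontop]
          · intro w hw
            rcases List.mem_append.1 hw with hw | hw
            · have : w = v := by simpa using hw
              exact ⟨(op, c), List.mem_cons_self, this ▸ hvc⟩
            · obtain ⟨p, hp, hwp⟩ := hδm w hw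
              exact ⟨p, List.mem_cons_of_mem _ hp, hwp⟩
          · intro _
            right
            rw [hδ]
            simp only [List.length_append, List.length_cons, List.length_nil]
            omega
          · intro _
            right
            exact ⟨(op, c), hopscope, by simpa using h0, hcontop⟩
        · -- no resolution at op: A skips, B appends op to pending
          have ha : part2Pass ((op, c) :: rest) (b, det, mp)
              = part2Pass rest (b, det, mp) := by
            simp only [part2Pass]
            rw [if_neg hlen]
          have hbcf : ¬ cnt.getD op 0 = 1 := by
            rw [hcntop]
            intro h
            refine hlen ?_
            have : (PySem.Set.diff c det).length = 1 := by exact_mod_cast h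
            simpa [PySem.Set.len] using this
          have hb : bPassGo index
                (op :: (rest.filter (fun p => !(mp₀.contains p.1))).map Prod.fst)
                (pend, cnt, sm, mp)
              = bPassGo index ((rest.filter (fun p => !(mp₀.contains p.1))).map Prod.fst)
                (pend ++ [op], cnt, sm, mp) := by
            simp only [bPassGo]
            rw [if_neg hbcf]
          rw [ha, hfl, hb]
          have hmp0rest : ∀ p ∈ rest, mp.contains p.1 = mp₀.contains p.1 :=
            fun p hp => hmp0 p (List.mem_cons_of_mem _ hp)
          obtain ⟨i2, i3, ⟨δ, hδ, hδm⟩, i5, i6a, i6b, i7, i8⟩ :=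
            ih det mp cnt sm (pend ++ [op]) b hsubrest hndrest hmp0rest hres hcnt hdet
          have hstable : ((part2Pass rest (b, det, mp)).2.2).contains op
              = mp.contains op := aPass_contains_stable rest _ op hopnotin
          refine ⟨?_, i3, ⟨δ, hδ, fun w hw => ?_⟩, i5, i6a, i6b, i7, i8⟩
          · rw [i2]
            rw [List.filter_cons]
            simp only [hstable, hmpop]
            simp
          · obtain ⟨p, hp, hwp⟩ := hδm w hw
            exact ⟨p, List.mem_cons_of_mem _ hp, hwp⟩

lemma loop_sim (candidates : List (Int × List Int))
    (hk : (candidates.map Prod.fst).Nodup)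
    (hnod2 : ∀ p ∈ candidates, p.2.Nodup)
    (index : PySem.Dict Int (List Int))
    (hidx : ∀ v, index.getD v [] = (candidates.filter (fun p => decide (v ∈ p.2))).map Prod.fst) :
    ∀ (fuel : Nat) (det : List Int) (mp cnt sm : PySem.Dict Int Int) (unres : List Int),
    det.Nodup →
    (∀ v ∈ det, v ∈ candidates.flatMap (fun p => p.2)) →
    (∀ p ∈ candidates, mp.contains p.1 = true → PySem.Set.diff p.2 det = []) →
    (∀ p ∈ candidates, mp.contains p.1 = false →
        cnt.getD p.1 0 = ((PySem.Set.diff p.2 det).length : Int) ∧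
        sm.getD p.1 0 = (PySem.Set.diff p.2 det).sum) →
    unres = (candidates.filter (fun p => !(mp.contains p.1))).map Prod.fst →
    ((candidates.flatMap (fun p => p.2)).dedup.length < det.length + fuel) →
    part2Loop candidates fuel det mp = bLoop index cnt sm mp unres := by
  intro fuel
  induction fuel with
  | zero =>
      intro det mp cnt sm unres hdet hdetsub _ _ _ hfuel
      exfalso
      have := nodup_length_le_dedup det (candidates.flatMap (fun p => p.2)) hdet hdetsub
      omega
  | succ fuel ihf =>
      intro det mp cnt sm unres hdet hdetsub hres hcnt hunres hfuel
      subst hunres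
      obtain ⟨i2, i3, ⟨δ, hδ, hδm⟩, i5, i6a, i6b, i7, i8⟩ :=
        pass_sim candidates mp index hk hnod2 hidx candidates det mp cnt sm [] true
          (fun p hp => hp) hk (fun p _ => rfl) hres hcnt hdet
      simp only [List.nil_append] at i2
      rw [bLoop]
      simp only [part2Loop]
      by_cases hdone : (part2Pass candidates (true, det, mp)).1 = true
      · have hid := aPass_id candidates _ hdone
        rw [hid] at i2 i3
        rw [if_pos (by rw [hid])]
        rw [dif_pos (by rw [i2])]
        rw [i3, hid]
      · have hdone' : (part2Pass candidates (true, det, mp)).1 = false := by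
          simpa using hdone
        rcases i6b hdone' with h' | ⟨p₀, hp₀, hm0, hm1⟩
        · exact absurd h' (by simp)
        · have hlt : ((candidates.filter
              (fun p => !((part2Pass candidates (true, det, mp)).2.2.contains p.1))).map
                Prod.fst).length
              < ((candidates.filter (fun p => !(mp.contains p.1))).map Prod.fst).length := by
            simp only [List.length_map]
            refine filter_length_lt _ _ candidates ?_ p₀ hp₀ (by simp [hm0]) (by simp [hm1])
            intro a ha hqa
            simp only [Bool.not_eq_true'] at hqa ⊢
            by_cases hma : mp.contains a.1 = true
            · rw [aPass_contains_mono candidates _ a.1 hma] at hqa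
              exact absurd hqa (by simp)
            · simpa using hma
          rw [if_neg (by rw [hdone']; simp)]
          rw [dif_neg (by rw [i2]; omega)]
          rw [i3]
          refine ihf (part2Pass candidates (true, det, mp)).2.1
            (part2Pass candidates (true, det, mp)).2.2 _ _ _ i5 ?_ i7 i8 i2 ?_
          · intro w hw
            rw [hδ] at hw
            rcases List.mem_append.1 hw with hw | hw
            · exact hdetsub w hw
            · obtain ⟨p, hp, hwp⟩ := hδm w hw
              exact List.mem_flatMap.2 ⟨p, hp, hwp⟩
          · rcases i6a hdone' with h' | h'
            · exact absurd h' (by simp)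
            · omega

-- ===== VERDICT (by name: the statement is the Claim_ definition above) =====
theorem part2_spec : Claim_equal_part2 := by
  intro candidates _ hpre
  obtain ⟨hk, hc⟩ := hpre
  unfold Spec_part2 part2 part2_alt
  congr 1
  rw [bBuild, bBuild_proj]
  refine (loop_sim candidates hk hc _ ?_ (part2Fuel candidates) PySem.Set.empty
    PySem.Dict.empty _ _ _ (by simp [PySem.Set.empty]) (by simp [PySem.Set.empty])
    ?_ ?_ ?_ ?_)
  · intro v
    rw [bIndex_getD v candidates hc PySem.Dict.empty]
    rfl
  · intro p _ hcont
    rw [PySem.Dict.contains_empty] at hcont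
    exact absurd hcont (by simp)
  · intro p hp _
    constructor
    · rw [init_insert_getD (fun q => ((q.2.length : Int))) 0 candidates hk p hp]
      rw [show (PySem.Set.empty : List Int) = [] from rfl, diff_nil_right]
    · rw [init_insert_getD (fun q => q.2.sum) 0 candidates hk p hp]
      rw [show (PySem.Set.empty : List Int) = [] from rfl, diff_nil_right]
  · have hfe : candidates.filter
        (fun p => !((PySem.Dict.empty : PySem.Dict Int Int).contains p.1)) = candidates := by
      refine List.filter_eq_self.2 ?_
      intro p _
      simp [PySem.Dict.contains_empty]
    rw [hfe]
  · simp only [part2Fuel, PySem.Set.empty, List.length_nil]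
    omega
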